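-- pv_equiv track=rewrite | github.com/Ahannila/Algos | viikko3/samebit.py | count
-- ===== SOURCE A (Python) =====
-- def count(s):
--     n = len(s)
--     result = 0
--     zeros = 0
--     ones = 0
--     for i in range(n):
--         if s[i] == '0':
--             zeros += 1
--         else:
--             ones += 1
--     zeros = zeros * (zeros - 1) // 2
--     ones = ones * (ones - 1) // 2
--     result = zeros + ones
--     return result
-- ===== SOURCE B (Python) =====
-- def count(s):
--     result = 0
--     zeros = 0
--     ones = 0
--     for c in s:
--         if c == '0':
--             result += zeros
--             zeros += 1
--         else:
--             result += ones
--             ones += 1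
--     return result
-- ===== Notes on version B (the rewrite author's own statement) =====
-- stated objective: alternative
-- what changed: Replaces A's count-then-closed-form n*(n-1)//2 computation with a single pass that accumulates pairs incrementally: each character adds the number of equal characters already seen.
import Mathlib
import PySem

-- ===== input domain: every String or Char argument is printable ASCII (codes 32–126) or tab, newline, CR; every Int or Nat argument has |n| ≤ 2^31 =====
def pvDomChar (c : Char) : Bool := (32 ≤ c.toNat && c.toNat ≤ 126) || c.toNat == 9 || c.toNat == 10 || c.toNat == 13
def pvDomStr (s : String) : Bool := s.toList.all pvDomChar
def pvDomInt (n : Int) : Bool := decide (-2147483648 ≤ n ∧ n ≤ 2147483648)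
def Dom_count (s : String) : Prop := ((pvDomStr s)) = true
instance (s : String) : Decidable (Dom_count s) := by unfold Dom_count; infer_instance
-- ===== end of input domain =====

-- B accumulates same-bit pairs incrementally in one pass instead of A's counts-then-closed-form; same cost (alternative decomposition).

-- ===== PORT A =====
-- A's loop counts zeros/ones, then combines with the n*(n-1)//2 formula.
def count (s : String) : Int :=
  let st := s.toList.foldl
    (fun (p : Int × Int) c => if c = '0' then (p.1 + 1, p.2) else (p.1, p.2 + 1)) (0, 0)
  PySem.Int.floordiv (st.1 * (st.1 - 1)) 2 + PySem.Int.floordiv (st.2 * (st.2 - 1)) 2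

-- ===== PORT B =====
-- B's loop: state (result, zeros, ones); each char adds the count of equal chars seen so far.
def count_alt (s : String) : Int :=
  (s.toList.foldl
    (fun (t : Int × Int × Int) c =>
      if c = '0' then (t.1 + t.2.1, t.2.1 + 1, t.2.2) else (t.1 + t.2.2, t.2.1, t.2.2 + 1))
    (0, 0, 0)).1

-- ===== PRECONDITION & SPEC =====
def Spec_count (s : String) (out : Int) : Prop := out = count_alt s
instance (s : String) (out : Int) : Decidable (Spec_count s out) := by unfold Spec_count; infer_instance

-- ===== CLAIM (what is proved, stated in full; the proofs are below) =====
def Claim_equal_count : Prop := ∀ (s : String), Dom_count s → Spec_count s (count s)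

-- ===== LEMMAS AND PROOFS =====

-- choose(x,2) as A computes it
def pvC2 (x : Int) : Int := PySem.Int.floordiv (x * (x - 1)) 2

theorem pvC2_step (x : Int) : pvC2 (x + 1) = pvC2 x + x := by
  unfold pvC2
  rw [PySem.Int.floordiv_eq_ediv_of_pos (by norm_num),
      PySem.Int.floordiv_eq_ediv_of_pos (by norm_num)]
  have h : (x + 1) * (x + 1 - 1) = x * (x - 1) + x * 2 := by ring
  rw [h, Int.add_mul_ediv_right _ _ (by norm_num : (2:Int) ≠ 0)]

theorem pv_loop_inv (l : List Char) (z o r : Int) (h : r = pvC2 z + pvC2 o) :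
    (l.foldl
      (fun (t : Int × Int × Int) c =>
        if c = '0' then (t.1 + t.2.1, t.2.1 + 1, t.2.2) else (t.1 + t.2.2, t.2.1, t.2.2 + 1))
      (r, z, o)).1
    = pvC2 (l.foldl
        (fun (p : Int × Int) c => if c = '0' then (p.1 + 1, p.2) else (p.1, p.2 + 1)) (z, o)).1
      + pvC2 (l.foldl
        (fun (p : Int × Int) c => if c = '0' then (p.1 + 1, p.2) else (p.1, p.2 + 1)) (z, o)).2 := by
  induction l generalizing z o r with
  | nil => simpa using h
  | cons c l ih =>
    by_cases hc : c = '0' <;> simp only [List.foldl_cons, hc, if_pos, ite_false]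
    · exact ih (z + 1) o (r + z) (by rw [h, pvC2_step]; ring)
    · exact ih z (o + 1) (r + o) (by rw [h, pvC2_step]; ring)

-- ===== VERDICT (by name: the statement is the Claim_ definition above) =====
theorem count_spec : Claim_equal_count := by
  intro s _
  unfold Spec_count count count_alt
  exact (pv_loop_inv s.toList 0 0 0 (by unfold pvC2; decide)).symm
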